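-- pv_equiv track=rewrite | github.com/LHCfitNikhef/smefit_database | scripts/yaml_ops_to_readme.py | build_generated_section
-- ===== SOURCE A (Python) =====
-- from collections import defaultdict
--
-- def op_to_coeff_name(op: str) -> str:
--     return ("c" + op[1:]) if op.startswith("O") else f"c{op}"
--
-- def build_generated_section(
--     ops_map: dict[str, str], cat_by_op: dict[str, str], raw_yaml: str
-- ) -> str:
--     # Track category order as they appear in YAML
--     seen_cats = []
--     for op in ops_map.keys():
--         c = cat_by_op.get(op, "Uncategorised")
--         if c not in seen_cats:
--             seen_cats.append(c)
--
--     # Group by category preserving insertion order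
--     grouped = defaultdict(list)
--     for op, expr in ops_map.items():
--         grouped[cat_by_op.get(op, "Uncategorised")].append((op_to_coeff_name(op), expr))
--
--     header = (
--         "## SMEFiT Wilson coefficients\n\n"
--         "Definitions are given in terms of the "
--         "[Warsaw basis (WCxf)](https://wcxf.github.io/assets/pdf/SMEFT.Warsaw.pdf).\n\n"
--         "This section is auto-generated from `operators_implemented.yaml`. "
--         "Do not edit it manually.\n\n"
--         "Each entry defines the Wilson coefficient `cX`, corresponding to the SMEFiT operator `OX`, "
--         "as used in the JSON data tables.\n\n"
--     )
--     parts = [header]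
--     for cat in seen_cats:
--         parts.append(f"### {cat}\n\n")
--         parts.append("```text\n")
--         for coeff, expr in grouped[cat]:
--             parts.append(f"{coeff} = {expr}\n")
--         parts.append("```\n\n")
--     return "".join(parts)
-- ===== SOURCE B (Python) =====
-- def build_generated_section(
--     ops_map: dict[str, str], cat_by_op: dict[str, str], raw_yaml: str
-- ) -> str:
--     # No grouping structure at all: tag each entry with its category and formatted
--     # line once, dedup the category sequence, then emit each section by a separate
--     # filtering scan of the tagged list (order within a category is ops_map order,
--     # identical to A's grouped lists).
--     header = (
--         "## SMEFiT Wilson coefficients\n\n"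
--         "Definitions are given in terms of the "
--         "[Warsaw basis (WCxf)](https://wcxf.github.io/assets/pdf/SMEFT.Warsaw.pdf).\n\n"
--         "This section is auto-generated from `operators_implemented.yaml`. "
--         "Do not edit it manually.\n\n"
--         "Each entry defines the Wilson coefficient `cX`, corresponding to the SMEFiT operator `OX`, "
--         "as used in the JSON data tables.\n\n"
--     )
--     pairs = [
--         (
--             cat_by_op.get(op, "Uncategorised"),
--             f"{('c' + op[1:]) if op.startswith('O') else 'c' + op} = {expr}\n",
--         )
--         for op, expr in ops_map.items()
--     ]
--     cats = list(dict.fromkeys(c for c, _ in pairs))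
--     sections = []
--     for cat in cats:
--         lines = "".join(line for c, line in pairs if c == cat)
--         sections.append(f"### {cat}\n\n```text\n{lines}```\n\n")
--     return header + "".join(sections)
-- ===== Notes on version B (the rewrite author's own statement) =====
-- stated objective: alternative
-- what changed: B keeps no grouping structure at all: instead of A's seen_cats order-tracking list plus a defaultdict grouping pass, B dedups the category sequence once with dict.fromkeys and then, for each category, makes a separate filtering scan over ops_map.items() to emit that category's lines directly.
import Mathlib
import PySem

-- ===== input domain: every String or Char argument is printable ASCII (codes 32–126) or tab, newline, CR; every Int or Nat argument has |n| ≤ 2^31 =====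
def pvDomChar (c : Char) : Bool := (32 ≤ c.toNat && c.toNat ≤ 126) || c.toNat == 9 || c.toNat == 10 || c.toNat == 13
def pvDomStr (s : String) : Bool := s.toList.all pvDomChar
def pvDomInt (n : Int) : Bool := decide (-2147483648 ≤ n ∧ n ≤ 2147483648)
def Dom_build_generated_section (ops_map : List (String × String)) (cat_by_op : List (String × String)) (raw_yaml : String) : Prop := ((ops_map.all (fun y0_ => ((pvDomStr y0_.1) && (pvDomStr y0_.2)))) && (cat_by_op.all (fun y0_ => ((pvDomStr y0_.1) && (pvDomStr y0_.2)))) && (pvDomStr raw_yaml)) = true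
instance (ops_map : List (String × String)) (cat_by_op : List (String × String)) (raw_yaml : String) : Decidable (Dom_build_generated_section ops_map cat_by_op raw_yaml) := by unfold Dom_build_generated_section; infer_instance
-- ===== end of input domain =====

-- B drops A's seen_cats list and grouping defaultdict entirely: it dedups the category
-- sequence once and emits each section by a per-category filtering scan of ops_map;
-- objective: alternative (return value only; raw_yaml is unused).

-- ===== PORT A =====
def pvHeader : String :=
  "## SMEFiT Wilson coefficients\n\nDefinitions are given in terms of the [Warsaw basis (WCxf)](https://wcxf.github.io/assets/pdf/SMEFT.Warsaw.pdf).\n\nThis section is auto-generated from `operators_implemented.yaml`. Do not edit it manually.\n\nEach entry defines the Wilson coefficient `cX`, corresponding to the SMEFiT operator `OX`, as used in the JSON data tables.\n\n"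

def op_to_coeff_name (op : String) : String :=
  if PySem.Str.startswith op "O" then "c" ++ PySem.Str.slice op (some 1) none else "c" ++ op

def build_generated_section (ops_map : List (String × String)) (cat_by_op : List (String × String)) (raw_yaml : String) : String :=
  let om := PySem.Dict.ofList ops_map
  let cb := PySem.Dict.ofList cat_by_op
  -- Track category order as they appear
  let seen_cats : List String := om.keys.foldl (fun acc op =>
      let c := cb.getD op "Uncategorised"
      if c ∈ acc then acc else acc ++ [c]) []
  -- Group by category preserving insertion order (defaultdict(list))
  let grouped : PySem.Dict String (List (String × String)) :=
    om.items.foldl (fun g p =>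
      g.modify (cb.getD p.1 "Uncategorised") [] (fun l => l ++ [(op_to_coeff_name p.1, p.2)]))
      PySem.Dict.empty
  let parts : List String := seen_cats.foldl (fun ps cat =>
      ((grouped.getD cat []).foldl (fun q ce => q ++ [ce.1 ++ " = " ++ ce.2 ++ "\n"])
        (ps ++ ["### " ++ cat ++ "\n\n", "```text\n"])) ++ ["```\n\n"]) [pvHeader]
  PySem.Str.join "" parts

-- ===== PORT B =====
def build_generated_section_alt (ops_map : List (String × String)) (cat_by_op : List (String × String)) (raw_yaml : String) : String :=
  let om := PySem.Dict.ofList ops_map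
  let cb := PySem.Dict.ofList cat_by_op
  -- pairs = [(category, formatted line) for each item], computed once
  let pairs : List (String × String) := om.items.map (fun p =>
    (cb.getD p.1 "Uncategorised",
     (if PySem.Str.startswith p.1 "O" then "c" ++ PySem.Str.slice p.1 (some 1) none
      else "c" ++ p.1) ++ " = " ++ p.2 ++ "\n"))
  -- cats = list(dict.fromkeys(c for c, _ in pairs))
  let cats : List String := PySem.List.dedup (pairs.map (fun q => q.1))
  -- one filtering scan of the tagged list per category
  let sections : List String := cats.map (fun cat =>
    let lines := PySem.Str.join "" ((pairs.filter (fun q => q.1 == cat)).map (fun q => q.2))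
    "### " ++ cat ++ "\n\n```text\n" ++ lines ++ "```\n\n")
  pvHeader ++ PySem.Str.join "" sections

-- ===== PRECONDITION & SPEC =====
def Spec_build_generated_section (ops_map : List (String × String)) (cat_by_op : List (String × String)) (raw_yaml : String) (out : String) : Prop := out = build_generated_section_alt ops_map cat_by_op raw_yaml
instance (ops_map : List (String × String)) (cat_by_op : List (String × String)) (raw_yaml : String) (out : String) : Decidable (Spec_build_generated_section ops_map cat_by_op raw_yaml out) := by unfold Spec_build_generated_section; infer_instance

-- ===== CLAIM (what is proved, stated in full; the proofs are below) =====
def Claim_equal_build_generated_section : Prop := ∀ (ops_map : List (String × String)) (cat_by_op : List (String × String)) (raw_yaml : String), Dom_build_generated_section ops_map cat_by_op raw_yaml → Spec_build_generated_section ops_map cat_by_op raw_yaml (build_generated_section ops_map cat_by_op raw_yaml)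

-- ===== LEMMAS AND PROOFS =====

theorem pvJoinNil : PySem.Str.join "" ([] : List String) = "" := rfl

theorem pvJoinCons (a : String) (l : List String) :
    PySem.Str.join "" (a :: l) = a ++ PySem.Str.join "" l := by
  cases l with
  | nil => simp [PySem.Str.join, PySem.Chars.join, List.intercalate, String.ofList_toList]
  | cons b bs =>
      simp [PySem.Str.join, PySem.Chars.join, List.intercalate,
            String.ofList_append, String.ofList_toList]

theorem pvJoinAppend (a b : List String) :
    PySem.Str.join "" (a ++ b) = PySem.Str.join "" a ++ PySem.Str.join "" b := by
  induction a with
  | nil => simp [pvJoinNil]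
  | cons x xs ih => simp [pvJoinCons, ih, String.append_assoc]

-- A's parts-list fold, joined, is a plain string fold over the categories
theorem pvOutFold (G : String → List (String × String)) :
    ∀ (seen : List String) (ps : List String) (out : String), PySem.Str.join "" ps = out →
    PySem.Str.join "" (seen.foldl (fun ps cat =>
        ((G cat).foldl (fun q ce => q ++ [ce.1 ++ " = " ++ ce.2 ++ "\n"])
          (ps ++ ["### " ++ cat ++ "\n\n", "```text\n"])) ++ ["```\n\n"]) ps)
      = seen.foldl (fun out cat =>
          out ++ ("### " ++ cat ++ "\n\n```text\n" ++
            PySem.Str.join "" ((G cat).map (fun p => p.1 ++ " = " ++ p.2 ++ "\n")) ++ "```\n\n")) out := by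
  intro seen
  induction seen with
  | nil => intro ps out h; simpa using h
  | cons c cs ih =>
      intro ps out h
      simp only [List.foldl_cons]
      apply ih
      rw [PySem.List.foldl_append_singleton_eq_map]
      have hlit : ("\n\n" : String) ++ "```text\n" = "\n\n```text\n" := rfl
      simp only [pvJoinAppend, pvJoinCons, pvJoinNil, h, String.append_assoc,
                 String.append_empty, hlit]

-- a string-accumulating fold is the join of the mapped list
theorem pvFoldJoin (s : String → String) :
    ∀ (l : List String) (out0 : String),
    l.foldl (fun out c => out ++ s c) out0 = out0 ++ PySem.Str.join "" (l.map s) := by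
  intro l
  induction l with
  | nil => intro out0; simp [pvJoinNil]
  | cons c cs ih =>
      intro out0
      simp only [List.foldl_cons, List.map_cons, pvJoinCons, ih, String.append_assoc]

-- ===== VERDICT (by name: the statement is the Claim_ definition above) =====
set_option maxHeartbeats 1000000 in
theorem build_generated_section_spec : Claim_equal_build_generated_section := by
  intro ops_map cat_by_op raw_yaml _
  simp only [Spec_build_generated_section, build_generated_section, build_generated_section_alt,
             op_to_coeff_name]
  set om := PySem.Dict.ofList ops_map with hom
  set cb := PySem.Dict.ofList cat_by_op with hcb
  set val : String × String → String × String := fun p =>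
      ((if PySem.Str.startswith p.1 "O" then "c" ++ PySem.Str.slice p.1 (some 1) none
        else "c" ++ p.1), p.2) with hval
  set pairs : List (String × String) := om.items.map (fun p =>
      (cb.getD p.1 "Uncategorised",
       (if PySem.Str.startswith p.1 "O" then "c" ++ PySem.Str.slice p.1 (some 1) none
        else "c" ++ p.1) ++ " = " ++ p.2 ++ "\n")) with hpairs
  -- A's seen_cats = B's cats
  have hseen : om.keys.foldl (fun acc op =>
        if cb.getD op "Uncategorised" ∈ acc then acc else acc ++ [cb.getD op "Uncategorised"]) []
      = PySem.List.dedup (pairs.map (fun q => q.1)) := by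
    have hf : (fun (acc : List String) op =>
        if cb.getD op "Uncategorised" ∈ acc then acc else acc ++ [cb.getD op "Uncategorised"])
        = fun acc op => PySem.Set.add acc (cb.getD op "Uncategorised") := by
      funext acc op
      rw [PySem.Set.add_eq_ite]
    rw [hf, PySem.List.dedup_eq_ofList, PySem.Set.ofList_eq_foldl, hpairs, List.map_map,
        List.foldl_map, show om.keys = om.items.map (fun p => p.1) from rfl, List.foldl_map]
    rfl
  -- A's grouped lookup, rendered to lines, = B's per-category filter of the tagged list
  have hgrp : ∀ cat : String,
      ((om.items.foldl (fun g p =>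
          g.modify (cb.getD p.1 "Uncategorised") [] (fun l => l ++ [val p]))
        PySem.Dict.empty).getD cat []).map (fun p => p.1 ++ " = " ++ p.2 ++ "\n")
      = (pairs.filter (fun q => q.1 == cat)).map (fun q => q.2) := by
    intro cat
    have h1 : om.items.foldl (fun g p =>
          g.modify (cb.getD p.1 "Uncategorised") [] (fun l => l ++ [val p])) PySem.Dict.empty
        = (om.items.map (fun p => (cb.getD p.1 "Uncategorised", val p))).foldl
            (fun g q => g.modify q.1 [] (fun l => l ++ [q.2])) PySem.Dict.empty := by
      rw [List.foldl_map]
    rw [h1, PySem.Dict.getD_foldl_modify_append, PySem.Dict.getD_empty, List.filter_map,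
        hpairs, List.filter_map]
    simp only [List.map_map, List.nil_append]
    rfl
  rw [hseen]
  rw [pvOutFold (fun cat => (om.items.foldl (fun g p =>
        g.modify (cb.getD p.1 "Uncategorised") [] (fun l => l ++ [val p]))
        PySem.Dict.empty).getD cat []) _ [pvHeader] pvHeader
      (by rw [pvJoinCons, pvJoinNil, String.append_empty])]
  rw [pvFoldJoin]
  congr 1
  apply congrArg
  apply List.map_congr_left
  intro cat _
  rw [hgrp cat]
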